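-- pv_equiv track=rewrite | github.com/Vikasgupta-45/Recursion-2026 | backend/strategy_engine/posting_optimizer.py | optimize_weekly_schedule
-- ===== SOURCE A (Python) =====
-- def optimize_weekly_schedule(best_day: str, video_ideas: list) -> dict:
--     """Agent that maps optimal content to the days of the week."""
--     schedule = {}
--
--     # Identify video weights
--     trend_video = next((v for v in video_ideas if v["format"] == "Trend video"), None)
--     short_video = next((v for v in video_ideas if v["format"] == "Short video"), None)
--     long_video = next((v for v in video_ideas if v["format"] == "Long tutorial"), None)
--
--     # Core logic: heaviest traffic potential drops on empirically Best Day
--     if trend_video: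
--         schedule[best_day] = trend_video
--
--     schedule["Monday"] = short_video if short_video else {"format": "Short video", "topic": "Brief update"}
--
--     mid_week = "Wednesday" if best_day != "Wednesday" else "Thursday"
--     schedule[mid_week] = long_video if long_video else {"format": "Community post", "topic": "Behind the scenes"}
--
--     return schedule
-- ===== SOURCE B (Python) =====
-- def optimize_weekly_schedule(best_day: str, video_ideas: list) -> dict:
--     """One backward pass with last-write-wins accumulators (= first occurrence forward)."""
--     trend = short = long = None
--     for v in reversed(video_ideas):
--         f = v["format"]
--         if f == "Trend video":
--             trend = v
--         elif f == "Short video":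
--             short = v
--         elif f == "Long tutorial":
--             long = v
--
--     schedule = {}
--     if trend:
--         schedule[best_day] = trend
--     schedule["Monday"] = short or {"format": "Short video", "topic": "Brief update"}
--     mid_week = "Thursday" if best_day == "Wednesday" else "Wednesday"
--     schedule[mid_week] = long or {"format": "Community post", "topic": "Behind the scenes"}
--     return schedule
-- ===== Notes on version B (the rewrite author's own statement) =====
-- stated objective: alternative
-- what changed: B replaces A's three separate first-match next() scans with a single backward pass over video_ideas maintaining three last-write-wins accumulator variables (last write while walking backwards = first occurrence forwards), then fills the schedule from those accumulators.
import Mathlib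
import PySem

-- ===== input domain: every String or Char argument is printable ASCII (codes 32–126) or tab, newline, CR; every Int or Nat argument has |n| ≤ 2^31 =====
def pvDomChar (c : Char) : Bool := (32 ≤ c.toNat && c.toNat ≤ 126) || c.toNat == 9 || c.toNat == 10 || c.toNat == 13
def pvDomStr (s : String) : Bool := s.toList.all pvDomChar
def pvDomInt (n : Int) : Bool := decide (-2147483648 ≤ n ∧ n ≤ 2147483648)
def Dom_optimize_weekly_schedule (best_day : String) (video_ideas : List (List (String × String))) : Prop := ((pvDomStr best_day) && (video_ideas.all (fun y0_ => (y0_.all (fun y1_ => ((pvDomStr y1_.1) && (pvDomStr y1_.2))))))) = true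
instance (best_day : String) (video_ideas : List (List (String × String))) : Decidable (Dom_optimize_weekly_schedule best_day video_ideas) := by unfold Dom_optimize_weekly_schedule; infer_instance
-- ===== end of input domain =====

-- B replaces A's three next() scans with one backward pass keeping three last-write-wins accumulators (alternative; same result).


-- ===== PORT A =====
-- v["format"] on an input dict (KeyError = none; Pre_ rules the none case out)
def pvFmt (v : List (String × String)) : Option String :=
  (PySem.Dict.mk v).get? "format"

def optimize_weekly_schedule (best_day : String) (video_ideas : List (List (String × String))) : List (String × List (String × String)) :=
  let schedule : PySem.Dict String (List (String × String)) := PySem.Dict.empty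
  -- next((v for v in video_ideas if v["format"] == …), None)
  let trend_video := video_ideas.find? (fun v => pvFmt v == some "Trend video")
  let short_video := video_ideas.find? (fun v => pvFmt v == some "Short video")
  let long_video := video_ideas.find? (fun v => pvFmt v == some "Long tutorial")
  -- if trend_video:  (Python truthiness of an Optional dict: not None and non-empty)
  let schedule := match trend_video with
    | some v => if v.isEmpty then schedule else schedule.insert best_day v
    | none => schedule
  let schedule := schedule.insert "Monday"
    (match short_video with
     | some v => if v.isEmpty then [("format", "Short video"), ("topic", "Brief update")] else v
     | none => [("format", "Short video"), ("topic", "Brief update")])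
  let mid_week := if best_day != "Wednesday" then "Wednesday" else "Thursday"
  let schedule := schedule.insert mid_week
    (match long_video with
     | some v => if v.isEmpty then [("format", "Community post"), ("topic", "Behind the scenes")] else v
     | none => [("format", "Community post"), ("topic", "Behind the scenes")])
  schedule.items

-- ===== PORT B =====
-- loop body: f = v["format"]; if/elif chain updating the (trend, short, long) accumulators
def pvAccStep (st : Option (List (String × String)) × Option (List (String × String)) × Option (List (String × String)))
    (v : List (String × String)) :
    Option (List (String × String)) × Option (List (String × String)) × Option (List (String × String)) :=
  let f := ((PySem.Dict.mk v).get? "format").getD ""   -- KeyError case (none) is outside Pre_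
  if f == "Trend video" then (some v, st.2.1, st.2.2)
  else if f == "Short video" then (st.1, some v, st.2.2)
  else if f == "Long tutorial" then (st.1, st.2.1, some v)
  else st

def optimize_weekly_schedule_alt (best_day : String) (video_ideas : List (List (String × String))) : List (String × List (String × String)) :=
  -- for v in reversed(video_ideas): … (last write backwards = first occurrence forwards)
  let acc := video_ideas.reverse.foldl pvAccStep (none, none, none)
  let trend := acc.1
  let short := acc.2.1
  let long := acc.2.2
  let schedule : PySem.Dict String (List (String × String)) := PySem.Dict.empty
  let schedule := match trend with
    | some v => if v.isEmpty then schedule else schedule.insert best_day v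
    | none => schedule
  -- schedule["Monday"] = short or {…}  (Python 'or': default if None or falsy/empty)
  let schedule := schedule.insert "Monday"
    (match short with
     | some v => if v.isEmpty then [("format", "Short video"), ("topic", "Brief update")] else v
     | none => [("format", "Short video"), ("topic", "Brief update")])
  let mid_week := if best_day == "Wednesday" then "Thursday" else "Wednesday"
  let schedule := schedule.insert mid_week
    (match long with
     | some v => if v.isEmpty then [("format", "Community post"), ("topic", "Behind the scenes")] else v
     | none => [("format", "Community post"), ("topic", "Behind the scenes")])
  schedule.items

-- ===== PRECONDITION & SPEC =====
-- Pre_ excludes lists containing a dict with no "format" key: A raises KeyError on almost all of them (it returns only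
-- when all three formats happen to occur before the first such dict), and B's backward accumulator pass raises there.
def Pre_optimize_weekly_schedule (best_day : String) (video_ideas : List (List (String × String))) : Prop :=
  ∀ v ∈ video_ideas, ((PySem.Dict.mk v).get? "format").isSome

instance (best_day : String) (video_ideas : List (List (String × String))) : Decidable (Pre_optimize_weekly_schedule best_day video_ideas) := by unfold Pre_optimize_weekly_schedule; infer_instance

def pvWitness_optimize_weekly_schedule : String × (List (List (String × String))) :=
  ("Friday", [[("format", "Trend video"), ("topic", "AI")], [("format", "Short video"), ("topic", "tips")]])

def Spec_optimize_weekly_schedule (best_day : String) (video_ideas : List (List (String × String))) (out : List (String × List (String × String))) : Prop := out = optimize_weekly_schedule_alt best_day video_ideas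
instance (best_day : String) (video_ideas : List (List (String × String))) (out : List (String × List (String × String))) : Decidable (Spec_optimize_weekly_schedule best_day video_ideas out) := by unfold Spec_optimize_weekly_schedule; infer_instance

-- ===== CLAIM (what is proved, stated in full; the proofs are below) =====
def Claim_equal_optimize_weekly_schedule : Prop := ∀ (best_day : String) (video_ideas : List (List (String × String))), Dom_optimize_weekly_schedule best_day video_ideas → Pre_optimize_weekly_schedule best_day video_ideas → Spec_optimize_weekly_schedule best_day video_ideas (optimize_weekly_schedule best_day video_ideas)

-- ===== LEMMAS AND PROOFS =====

-- The backward last-write-wins pass computes exactly the three first-match scans A performs,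
-- as long as every dict in the list carries a "format" key (traversal order does not matter).
theorem revfold_eq_find? :
    ∀ (l : List (List (String × String))),
    (∀ v ∈ l, ((PySem.Dict.mk v).get? "format").isSome) →
    l.reverse.foldl pvAccStep (none, none, none)
      = (l.find? (fun v => pvFmt v == some "Trend video"),
         l.find? (fun v => pvFmt v == some "Short video"),
         l.find? (fun v => pvFmt v == some "Long tutorial")) := by
  intro l
  induction l with
  | nil => intro _; simp
  | cons v l ih =>
    intro h
    obtain ⟨s, hs⟩ := Option.isSome_iff_exists.mp (h v (by simp))
    have hrest : ∀ w ∈ l, ((PySem.Dict.mk w).get? "format").isSome := fun w hw => h w (by simp [hw])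
    have : (v :: l).reverse.foldl pvAccStep (none, none, none)
        = pvAccStep (l.reverse.foldl pvAccStep (none, none, none)) v := by
      simp [List.reverse_cons, List.foldl_append]
    rw [this, ih hrest]
    simp only [List.find?_cons]
    have hpv : pvFmt v = some s := hs
    by_cases h1 : s = "Trend video"
    · subst h1; simp [pvAccStep, hs, hpv]
    · by_cases h2 : s = "Short video"
      · subst h2; simp [pvAccStep, hs, hpv]
      · by_cases h3 : s = "Long tutorial"
        · subst h3; simp [pvAccStep, hs, hpv]
        · have e1 : (s == "Trend video") = false := by simp [h1]
          have e2 : (s == "Short video") = false := by simp [h2]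
          have e3 : (s == "Long tutorial") = false := by simp [h3]
          simp [pvAccStep, hs, hpv, e1, e2, e3]

-- ===== VERDICT (by name: the statement is the Claim_ definition above) =====
theorem optimize_weekly_schedule_spec : Claim_equal_optimize_weekly_schedule := by
  intro best_day video_ideas _ hpre
  unfold Spec_optimize_weekly_schedule optimize_weekly_schedule optimize_weekly_schedule_alt
  rw [revfold_eq_find? video_ideas hpre]
  have hmid : (if best_day != "Wednesday" then "Wednesday" else "Thursday")
      = (if best_day == "Wednesday" then "Thursday" else "Wednesday") := by
    by_cases hbd : best_day = "Wednesday" <;> simp [hbd]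
  simp only [hmid]
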